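-- pv_equiv track=rewrite | github.com/ayush1512/DSA | Parikshak/SnakeLadder.py | get_final_position
-- ===== SOURCE A (Python) =====
-- def get_final_position(pos, board_map):
--     visited = set()
--     while pos in board_map:
--         if pos in visited:
--             break
--         visited.add(pos)
--         pos = board_map[pos]
--     return pos
-- ===== SOURCE B (Python) =====
-- def get_final_position(pos, board_map):
--     # Floyd's tortoise-and-hare: O(1) extra space instead of a visited set.
--     # If the chain terminates, the hare reaches the terminal square first and
--     # we return it; if the chain cycles, the hare meets the tortoise, and the
--     # classic second phase finds the cycle entry, which is exactly the first
--     # position A's walk would revisit.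
--     slow = fast = pos
--     while True:
--         if fast not in board_map:
--             return fast
--         fast = board_map[fast]
--         if fast not in board_map:
--             return fast
--         fast = board_map[fast]
--         slow = board_map[slow]
--         if slow == fast:
--             break
--     slow = pos
--     while slow != fast:
--         slow = board_map[slow]
--         fast = board_map[fast]
--     return slow
-- ===== Notes on version B (the rewrite author's own statement) =====
-- stated objective: alternative
-- what changed: Replaces A's visited-set walk by Floyd's tortoise-and-hare cycle detection: a fast pointer either reaches the terminal square or meets the slow pointer inside a cycle, and the classic second phase then locates the cycle entry (A's first-revisited position) using O(1) extra space.
import Mathlib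
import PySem

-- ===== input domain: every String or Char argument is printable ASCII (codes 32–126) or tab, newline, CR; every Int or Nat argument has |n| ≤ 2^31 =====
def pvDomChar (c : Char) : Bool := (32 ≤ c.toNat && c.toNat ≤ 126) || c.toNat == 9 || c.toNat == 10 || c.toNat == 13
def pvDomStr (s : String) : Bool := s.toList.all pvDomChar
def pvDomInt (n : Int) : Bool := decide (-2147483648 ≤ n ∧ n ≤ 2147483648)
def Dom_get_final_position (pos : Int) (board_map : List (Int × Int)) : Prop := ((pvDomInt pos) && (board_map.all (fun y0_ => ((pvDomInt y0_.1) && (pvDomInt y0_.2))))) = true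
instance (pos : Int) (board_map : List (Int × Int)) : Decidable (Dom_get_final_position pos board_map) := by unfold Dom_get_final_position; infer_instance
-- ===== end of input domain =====

-- B replaces A's visited-set walk by Floyd's tortoise-and-hare cycle detection (O(1) extra space).

-- ===== PORT A =====
-- A's while-loop with a visited set; fuel = board_map.length + 1 provably suffices (see lemmas).
def pvGoA (m : PySem.Dict Int Int) : Nat → Int → PySem.Set Int → Int
  | 0, pos, _ => pos
  | fuel+1, pos, visited =>
    if m.contains pos then
      if PySem.Set.contains visited pos then pos
      else pvGoA m fuel (m.getD pos 0) (PySem.Set.add visited pos)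
    else pos

def get_final_position (pos : Int) (board_map : List (Int × Int)) : Int :=
  pvGoA (PySem.Dict.mk board_map) (board_map.length + 1) pos PySem.Set.empty

-- ===== PORT B =====
-- B's first while-loop: hare steps twice (checking membership before each step, as the
-- Python does), tortoise once; returns .inl on a terminal square, .inr on a meeting.
-- Fuel = board_map.length + 1 provably suffices (see lemmas).
def pvPhase1 (m : PySem.Dict Int Int) : Nat → Int → Int → Int ⊕ Int
  | 0, _, fast => Sum.inl fast
  | fuel+1, slow, fast =>
    if m.contains fast then
      let fast1 := m.getD fast 0
      if m.contains fast1 then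
        let fast2 := m.getD fast1 0
        let slow1 := m.getD slow 0
        if slow1 = fast2 then Sum.inr slow1
        else pvPhase1 m fuel slow1 fast2
      else Sum.inl fast1
    else Sum.inl fast

-- B's second while-loop: both pointers step once until they coincide.
def pvPhase2 (m : PySem.Dict Int Int) : Nat → Int → Int → Int
  | 0, slow, _ => slow
  | fuel+1, slow, fast =>
    if slow = fast then slow
    else pvPhase2 m fuel (m.getD slow 0) (m.getD fast 0)

def get_final_position_alt (pos : Int) (board_map : List (Int × Int)) : Int :=
  match pvPhase1 (PySem.Dict.mk board_map) (board_map.length + 1) pos pos with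
  | Sum.inl ans => ans
  | Sum.inr meet => pvPhase2 (PySem.Dict.mk board_map) (board_map.length + 1) pos meet

-- ===== PRECONDITION & SPEC =====
def Spec_get_final_position (pos : Int) (board_map : List (Int × Int)) (out : Int) : Prop := out = get_final_position_alt pos board_map
instance (pos : Int) (board_map : List (Int × Int)) (out : Int) : Decidable (Spec_get_final_position pos board_map out) := by unfold Spec_get_final_position; infer_instance

-- ===== CLAIM (what is proved, stated in full; the proofs are below) =====
def Claim_equal_get_final_position : Prop := ∀ (pos : Int) (board_map : List (Int × Int)), Dom_get_final_position pos board_map → Spec_get_final_position pos board_map (get_final_position pos board_map)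

-- ===== LEMMAS AND PROOFS =====

-- the totalised step function: g x = board_map[x] if x is a key, else x (a fixed point)
def pvG (l : List (Int × Int)) (x : Int) : Int := (PySem.Dict.mk l).getD x x
-- the orbit x_k = g^[k] pos
def pvX (l : List (Int × Int)) (pos : Int) (k : Nat) : Int := (pvG l)^[k] pos

-- rho-shape data of the orbit: mu = preperiod (entry index), lam = period
def pvRho (l : List (Int × Int)) (pos : Int) (mu lam : Nat) : Prop :=
  1 ≤ lam ∧ pvX l pos (mu + lam) = pvX l pos mu ∧
  (∀ k d : Nat, pvX l pos (k + d + 1) = pvX l pos k → mu ≤ k) ∧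
  (∀ d : Nat, 0 < d → d < lam → pvX l pos (mu + d) ≠ pvX l pos mu)

theorem pvX_succ (l : List (Int × Int)) (pos : Int) (k : Nat) :
    pvX l pos (k + 1) = pvG l (pvX l pos k) := Function.iterate_succ_apply' (pvG l) k pos

theorem pvG_of_not_contains (l : List (Int × Int)) (y : Int)
    (h : (PySem.Dict.mk l).contains y = false) : pvG l y = y := by
  unfold pvG
  rw [PySem.Dict.getD_eq_get?_getD]
  rw [PySem.Dict.contains_eq_isSome_get?] at h
  simp only [Option.isSome_eq_false_iff, Option.isNone_iff_eq_none] at h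
  rw [h]; rfl

theorem pvGetD_eq_pvG (l : List (Int × Int)) (y : Int)
    (h : (PySem.Dict.mk l).contains y = true) : (PySem.Dict.mk l).getD y 0 = pvG l y := by
  unfold pvG
  rw [PySem.Dict.contains_eq_isSome_get?, Option.isSome_iff_exists] at h
  obtain ⟨v, hv⟩ := h
  rw [PySem.Dict.getD_eq_get?_getD, PySem.Dict.getD_eq_get?_getD, hv]; rfl

theorem pvMem_keys (l : List (Int × Int)) (y : Int)
    (h : (PySem.Dict.mk l).contains y = true) : y ∈ l.map Prod.fst := by
  rw [PySem.Dict.contains_eq_isSome_get?, Option.isSome_iff_exists] at h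
  obtain ⟨v, hv⟩ := h
  simp only [PySem.Dict.get?, Option.map_eq_some_iff] at hv
  obtain ⟨p, hp, hv2⟩ := hv
  have hm := List.mem_of_find?_eq_some hp
  have hk := List.find?_some hp
  simp only [beq_iff_eq] at hk
  exact List.mem_map.mpr ⟨p, hm, hk⟩

-- a repetition propagates forward
theorem pvX_propagate (l : List (Int × Int)) (pos : Int) (i d : Nat)
    (h : pvX l pos (i + d) = pvX l pos i) :
    ∀ k, i ≤ k → pvX l pos (k + d) = pvX l pos k := by
  intro k hk
  induction k, hk using Nat.le_induction with
  | base => exact h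
  | succ k hk ih =>
    have : k + 1 + d = (k + d) + 1 := by omega
    rw [this, pvX_succ, ih, ← pvX_succ]

-- periodicity with any multiple of lam, from mu on
theorem pvX_period_mul (l : List (Int × Int)) (pos : Int) (mu lam : Nat)
    (h : pvRho l pos mu lam) :
    ∀ k c, mu ≤ k → pvX l pos (k + c * lam) = pvX l pos k := by
  intro k c hk
  induction c with
  | zero => simp
  | succ c ih =>
    have h1 : k + (c + 1) * lam = (k + c * lam) + lam := by ring
    rw [h1, pvX_propagate l pos mu lam h.2.1 (k + c * lam) (by omega), ih]

-- once a non-key is reached the orbit is constant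
theorem pvX_fixed (l : List (Int × Int)) (pos : Int) (j : Nat)
    (h : (PySem.Dict.mk l).contains (pvX l pos j) = false) :
    ∀ t, pvX l pos (j + t) = pvX l pos j := by
  intro t
  induction t with
  | zero => rfl
  | succ t ih =>
    have : j + (t + 1) = (j + t) + 1 := by omega
    rw [this, pvX_succ, ih, pvG_of_not_contains l _ h]

-- any non-key orbit value equals the entry value x_mu
theorem pvX_nonkey_eq_mu (l : List (Int × Int)) (pos : Int) (mu lam : Nat) (j : Nat)
    (h : pvRho l pos mu lam)
    (hk : (PySem.Dict.mk l).contains (pvX l pos j) = false) :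
    pvX l pos j = pvX l pos mu := by
  have hfix := pvX_fixed l pos j hk
  have hmu : mu ≤ j := by
    apply h.2.2.1 j 0
    have := hfix 1
    simpa using this
  have hle : j ≤ mu + j * lam := by
    have : j ≤ j * lam := Nat.le_mul_of_pos_right j h.1
    omega
  have h1 : pvX l pos (mu + j * lam) = pvX l pos j := by
    have := hfix (mu + j * lam - j)
    rwa [show j + (mu + j * lam - j) = mu + j * lam by omega] at this
  rw [← h1, pvX_period_mul l pos mu lam h mu j le_rfl]

-- the first mu + lam orbit values are pairwise distinct
theorem pvX_inj (l : List (Int × Int)) (pos : Int) (mu lam : Nat)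
    (h : pvRho l pos mu lam) :
    ∀ i j, i < j → j < mu + lam → pvX l pos i ≠ pvX l pos j := by
  intro i j hij hjlt heq
  have hmui : mu ≤ i := by
    apply h.2.2.1 i (j - i - 1)
    rw [show i + (j - i - 1) + 1 = j by omega]; exact heq.symm
  have hprop := pvX_propagate l pos i (j - i) (by rw [show i + (j - i) = j by omega]; exact heq.symm)
  have hk : i ≤ mu + lam - (j - i) := by omega
  have h2 := hprop (mu + lam - (j - i)) hk
  rw [show mu + lam - (j - i) + (j - i) = mu + lam by omega, h.2.1] at h2
  have h3 : mu + lam - (j - i) = mu + (lam - (j - i)) := by omega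
  rw [h3] at h2
  exact h.2.2.2 (lam - (j - i)) (by omega) (by omega) h2.symm

-- distinct keys bound an index range by the number of entries
theorem pvCard (l : List (Int × Int)) (pos : Int) (k : Nat)
    (hkeys : ∀ j, j < k → (PySem.Dict.mk l).contains (pvX l pos j) = true)
    (hinj : ∀ i j, i < j → j < k → pvX l pos i ≠ pvX l pos j) :
    k ≤ l.length := by
  have hmaps : ∀ j ∈ Finset.range k, pvX l pos j ∈ (l.map Prod.fst).toFinset := by
    intro j hj
    rw [List.mem_toFinset]
    exact pvMem_keys l _ (hkeys j (Finset.mem_range.mp hj))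
  have hinjOn : Set.InjOn (pvX l pos) (Finset.range k) := by
    intro a ha b hb hab
    rcases lt_trichotomy a b with hlt | heq | hgt
    · exact absurd hab (hinj a b hlt (Finset.mem_range.mp (Finset.mem_coe.mp hb)))
    · exact heq
    · exact absurd hab.symm (hinj b a hgt (Finset.mem_range.mp (Finset.mem_coe.mp ha)))
  have hcard := Finset.card_le_card_of_injOn (pvX l pos) hmaps hinjOn
  rw [Finset.card_range] at hcard
  calc k ≤ (l.map Prod.fst).toFinset.card := hcard
    _ ≤ (l.map Prod.fst).length := (l.map Prod.fst).toFinset_card_le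
    _ = l.length := List.length_map ..

theorem pvX_keys_lt (l : List (Int × Int)) (pos : Int) (mu lam : Nat)
    (h : pvRho l pos mu lam) :
    ∀ j, j + 1 < mu + lam → (PySem.Dict.mk l).contains (pvX l pos j) = true := by
  intro j hj
  by_contra hc
  have hc' : (PySem.Dict.mk l).contains (pvX l pos j) = false := by
    cases hb : (PySem.Dict.mk l).contains (pvX l pos j)
    · rfl
    · exact absurd hb hc
  have := pvX_fixed l pos j hc' 1
  exact pvX_inj l pos mu lam h j (j + 1) (by omega) hj this.symm

theorem pvMuLam_le (l : List (Int × Int)) (pos : Int) (mu lam : Nat)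
    (h : pvRho l pos mu lam) : mu + lam ≤ l.length + 1 := by
  have := pvCard l pos (mu + lam - 1)
    (fun j hj => pvX_keys_lt l pos mu lam h j (by omega))
    (fun i j hij hj => pvX_inj l pos mu lam h i j hij (by omega))
  omega

-- any period of a cycle point is a multiple of lam
theorem pvDvd (l : List (Int × Int)) (pos : Int) (mu lam : Nat) (i d : Nat)
    (h : pvRho l pos mu lam) (_hi : mu ≤ i) (_hd : 1 ≤ d)
    (heq : pvX l pos (i + d) = pvX l pos i) : lam ∣ d := by
  have hprop := pvX_propagate l pos i d heq
  set r := d % lam with hr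
  set q := d / lam with hq
  have hy : i ≤ mu + i * lam := by
    have : i ≤ i * lam := Nat.le_mul_of_pos_right i h.1
    omega
  have h1 : pvX l pos (mu + i * lam + d) = pvX l pos (mu + i * lam) := hprop _ hy
  have h2 : pvX l pos (mu + i * lam) = pvX l pos mu :=
    pvX_period_mul l pos mu lam h mu i le_rfl
  have hd2 : d = q * lam + r := by
    rw [hq, hr, Nat.mul_comm]
    exact (Nat.div_add_mod d lam).symm
  have h3 : mu + i * lam + d = (mu + r) + (i + q) * lam := by rw [hd2]; ring
  have h4 : pvX l pos (mu + i * lam + d) = pvX l pos (mu + r) := by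
    rw [h3]; exact pvX_period_mul l pos mu lam h (mu + r) (i + q) (by omega)
  have h5 : pvX l pos (mu + r) = pvX l pos mu := by rw [← h4, h1, h2]
  have hr0 : r = 0 := by
    by_contra hrne
    exact h.2.2.2 r (by omega) (Nat.mod_lt d h.1) h5
  exact Nat.dvd_of_mod_eq_zero hr0

-- a Floyd meeting x_m = x_{2m} gives x_{mu+m} = x_mu
theorem pvMeet (l : List (Int × Int)) (pos : Int) (mu lam : Nat) (m : Nat)
    (h : pvRho l pos mu lam) (hm1 : 1 ≤ m)
    (hm : pvX l pos (2 * m) = pvX l pos m) : pvX l pos (mu + m) = pvX l pos mu := by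
  have hmu : mu ≤ m := by
    apply h.2.2.1 m (m - 1)
    rw [show m + (m - 1) + 1 = 2 * m by omega]; exact hm
  have hdvd : lam ∣ m := by
    apply pvDvd l pos mu lam m m h hmu hm1
    rw [show m + m = 2 * m by omega]; exact hm
  obtain ⟨c, hc⟩ := hdvd
  rw [hc, show mu + lam * c = mu + c * lam by ring]
  exact pvX_period_mul l pos mu lam h mu c le_rfl

-- a genuine meeting with all earlier squares on the board means every orbit value is a key
theorem pvMeet_keys (l : List (Int × Int)) (pos : Int) (m : Nat)
    (ht : ∀ t, t < 2 * m → (PySem.Dict.mk l).contains (pvX l pos t) = true)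
    (hm1 : 1 ≤ m) (hm : pvX l pos (2 * m) = pvX l pos m) :
    ∀ k, (PySem.Dict.mk l).contains (pvX l pos k) = true := by
  have hprop : ∀ k, m ≤ k → pvX l pos (k + m) = pvX l pos k := by
    apply pvX_propagate l pos m m
    rw [show m + m = 2 * m by omega]; exact hm
  intro k
  induction k using Nat.strong_induction_on with
  | _ k ih =>
    by_cases hk : k < 2 * m
    · exact ht k hk
    · have hkm : m ≤ k - m := by omega
      have : pvX l pos k = pvX l pos (k - m) := by
        have := hprop (k - m) hkm
        rwa [show k - m + m = k by omega] at this
      rw [this]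
      exact ih (k - m) (by omega)

-- the rho data exists for every orbit (pigeonhole on the keys)
theorem pvRho_exists (l : List (Int × Int)) (pos : Int) :
    ∃ mu lam, pvRho l pos mu lam := by
  classical
  have hex : ∃ k, ∃ d, pvX l pos (k + d + 1) = pvX l pos k := by
    by_cases hall : ∀ j, j < l.length + 1 → (PySem.Dict.mk l).contains (pvX l pos j) = true
    · have hc : (l.map Prod.fst).toFinset.card < (Finset.range (l.length + 1)).card := by
        rw [Finset.card_range]
        calc (l.map Prod.fst).toFinset.card ≤ (l.map Prod.fst).length :=
              (l.map Prod.fst).toFinset_card_le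
          _ = l.length := List.length_map ..
          _ < l.length + 1 := by omega
      obtain ⟨i, hi, j, hj, hne, heq⟩ :=
        Finset.exists_ne_map_eq_of_card_lt_of_maps_to hc
          (fun j hj => List.mem_toFinset.mpr
            (pvMem_keys l _ (hall j (Finset.mem_range.mp hj))))
      rcases lt_or_gt_of_ne hne with hlt | hgt
      · exact ⟨i, j - i - 1, by rw [show i + (j - i - 1) + 1 = j by omega]; exact heq.symm⟩
      · exact ⟨j, i - j - 1, by rw [show j + (i - j - 1) + 1 = i by omega]; exact heq⟩
    · push_neg at hall
      obtain ⟨j, hj, hc⟩ := hall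
      have hc' : (PySem.Dict.mk l).contains (pvX l pos j) = false := by
        cases hb : (PySem.Dict.mk l).contains (pvX l pos j)
        · rfl
        · exact absurd hb hc
      exact ⟨j, 0, by simpa using pvX_fixed l pos j hc' 1⟩
  set P : Nat → Prop := fun k => ∃ d, pvX l pos (k + d + 1) = pvX l pos k with hP
  have hexP : ∃ k, P k := hex
  refine ⟨Nat.find hexP, ?_⟩
  obtain ⟨d0, hd0⟩ := Nat.find_spec hexP
  have hexL : ∃ d, pvX l pos (Nat.find hexP + d + 1) = pvX l pos (Nat.find hexP) := ⟨d0, hd0⟩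
  refine ⟨Nat.find hexL + 1, by omega, ?_, ?_, ?_⟩
  · rw [show Nat.find hexP + (Nat.find hexL + 1) = Nat.find hexP + Nat.find hexL + 1 by omega]
    exact Nat.find_spec hexL
  · intro k d hkd
    exact Nat.find_min' hexP ⟨d, hkd⟩
  · intro d hd0' hdlt heq
    have : pvX l pos (Nat.find hexP + (d - 1) + 1) = pvX l pos (Nat.find hexP) := by
      rwa [show Nat.find hexP + (d - 1) + 1 = Nat.find hexP + d by omega]
    exact Nat.find_min hexL (m := d - 1) (by omega) this

-- B's phase 2 returns the entry value x_mu
theorem pvPhase2_eq (l : List (Int × Int)) (pos : Int) (mu lam m : Nat)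
    (h : pvRho l pos mu lam) (hm1 : 1 ≤ m) (hm : pvX l pos (2 * m) = pvX l pos m)
    (hK : ∀ k, (PySem.Dict.mk l).contains (pvX l pos k) = true) :
    ∀ fuel j, j ≤ mu → mu - j < fuel →
      pvPhase2 (PySem.Dict.mk l) fuel (pvX l pos j) (pvX l pos (m + j)) = pvX l pos mu := by
  intro fuel
  induction fuel with
  | zero => intro j hj hfuel; omega
  | succ fuel ih =>
    intro j hj hfuel
    simp only [pvPhase2]
    by_cases hje : pvX l pos j = pvX l pos (m + j)
    · rw [if_pos hje]
      have hge : mu ≤ j := h.2.2.1 j (m - 1)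
        (by rw [show j + (m - 1) + 1 = m + j by omega]; exact hje.symm)
      rw [le_antisymm hj hge]
    · rw [if_neg hje]
      have hjlt : j < mu := by
        rcases Nat.lt_or_ge j mu with hlt | hge
        · exact hlt
        · exfalso
          apply hje
          rw [le_antisymm hj hge, show m + mu = mu + m by omega]
          exact (pvMeet l pos mu lam m h hm1 hm).symm
      have h1 : (PySem.Dict.mk l).getD (pvX l pos j) 0 = pvX l pos (j + 1) := by
        rw [pvGetD_eq_pvG l _ (hK j), ← pvX_succ]
      have h2 : (PySem.Dict.mk l).getD (pvX l pos (m + j)) 0 = pvX l pos (m + (j + 1)) := by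
        rw [pvGetD_eq_pvG l _ (hK (m + j)), ← pvX_succ,
          show m + j + 1 = m + (j + 1) by omega]
      rw [h1, h2]
      exact ih (j + 1) (by omega) (by omega)


-- B's phase 1 (composed with phase 2 on a meeting) returns x_mu
theorem pvPhase1_eq (l : List (Int × Int)) (pos : Int) (mu lam j0 : Nat)
    (h : pvRho l pos mu lam)
    (hj0b : pvX l pos j0 = pvX l pos (2 * j0))
    (hmu : mu ≤ l.length) :
    ∀ fuel i, i < j0 → j0 - i ≤ fuel →
      (∀ t, t < 2 * i → (PySem.Dict.mk l).contains (pvX l pos t) = true) →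
      (match pvPhase1 (PySem.Dict.mk l) fuel (pvX l pos i) (pvX l pos (2 * i)) with
       | Sum.inl a => a
       | Sum.inr mt => pvPhase2 (PySem.Dict.mk l) (l.length + 1) pos mt) = pvX l pos mu := by
  intro fuel
  induction fuel with
  | zero => intro i hi hfuel ht; omega
  | succ fuel ih =>
    intro i hi hfuel ht
    simp only [pvPhase1]
    cases hf : (PySem.Dict.mk l).contains (pvX l pos (2 * i)) with
    | false =>
      rw [if_neg (by simp)]
      exact pvX_nonkey_eq_mu l pos mu lam (2 * i) h hf
    | true =>
      rw [if_pos rfl]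
      have e1 : (PySem.Dict.mk l).getD (pvX l pos (2 * i)) 0 = pvX l pos (2 * i + 1) := by
        rw [pvGetD_eq_pvG l _ hf, ← pvX_succ]
      rw [show (PySem.Dict.mk l).getD (pvX l pos (2 * i)) 0 = pvX l pos (2 * i + 1) from e1]
      cases hf1 : (PySem.Dict.mk l).contains (pvX l pos (2 * i + 1)) with
      | false =>
        rw [if_neg (by simp)]
        exact pvX_nonkey_eq_mu l pos mu lam (2 * i + 1) h hf1
      | true =>
        rw [if_pos rfl]
        have e2 : (PySem.Dict.mk l).getD (pvX l pos (2 * i + 1)) 0 = pvX l pos (2 * i + 2) := by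
          rw [pvGetD_eq_pvG l _ hf1, ← pvX_succ]
        have hci : (PySem.Dict.mk l).contains (pvX l pos i) = true := by
          rcases Nat.eq_zero_or_pos i with h0 | hpos
          · subst h0; simpa using hf
          · exact ht i (by omega)
        have e3 : (PySem.Dict.mk l).getD (pvX l pos i) 0 = pvX l pos (i + 1) := by
          rw [pvGetD_eq_pvG l _ hci, ← pvX_succ]
        rw [e2, e3]
        have htall : ∀ t, t < 2 * (i + 1) →
            (PySem.Dict.mk l).contains (pvX l pos t) = true := by
          intro t htlt
          rcases Nat.lt_or_ge t (2 * i) with h1 | h2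
          · exact ht t h1
          · have : t = 2 * i ∨ t = 2 * i + 1 := by omega
            rcases this with h3 | h3 <;> subst h3
            · exact hf
            · exact hf1
        by_cases hmeet : pvX l pos (i + 1) = pvX l pos (2 * i + 2)
        · rw [if_pos hmeet]
          have hm : pvX l pos (2 * (i + 1)) = pvX l pos (i + 1) := by
            rw [show 2 * (i + 1) = 2 * i + 2 by omega]; exact hmeet.symm
          have hK := pvMeet_keys l pos (i + 1) htall (by omega) hm
          exact pvPhase2_eq l pos mu lam (i + 1) h (by omega) hm hK
            (l.length + 1) 0 (by omega) (by omega)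
        · rw [if_neg hmeet]
          have hi1 : i + 1 < j0 := by
            rcases Nat.lt_or_ge (i + 1) j0 with hlt | hge
            · exact hlt
            · exfalso
              apply hmeet
              have hij : i + 1 = j0 := by omega
              rw [hij, show 2 * i + 2 = 2 * j0 by omega]
              exact hj0b
          have := ih (i + 1) hi1 (by omega) htall
          rwa [show 2 * (i + 1) = 2 * i + 2 by omega] at this


-- A's loop returns x_mu
theorem pvGoA_eq (l : List (Int × Int)) (pos : Int) (mu lam : Nat)
    (h : pvRho l pos mu lam) :
    ∀ fuel k visited,
      (∀ y, PySem.Set.contains visited y = true ↔ ∃ j, j < k ∧ pvX l pos j = y) →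
      k ≤ mu + lam →
      (∀ j, j < k → (PySem.Dict.mk l).contains (pvX l pos j) = true) →
      l.length + 1 - k ≤ fuel →
      pvGoA (PySem.Dict.mk l) fuel (pvX l pos k) visited = pvX l pos mu := by
  intro fuel
  induction fuel with
  | zero =>
    intro k visited hvis hk hkeys hfuel
    exfalso
    have := pvCard l pos k hkeys
      (fun i j hij hj => pvX_inj l pos mu lam h i j hij (by omega))
    omega
  | succ fuel ih =>
    intro k visited hvis hk hkeys hfuel
    simp only [pvGoA]
    cases hc : (PySem.Dict.mk l).contains (pvX l pos k) with
    | false =>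
      rw [if_neg (by simp)]
      exact pvX_nonkey_eq_mu l pos mu lam k h hc
    | true =>
      rw [if_pos rfl]
      cases hv : PySem.Set.contains visited (pvX l pos k) with
      | true =>
        rw [if_pos rfl]
        obtain ⟨j, hjk, hje⟩ := (hvis (pvX l pos k)).mp hv
        have hkeq : k = mu + lam := by
          by_contra hne
          exact pvX_inj l pos mu lam h j k hjk (by omega) hje
        rw [hkeq, h.2.1]
      | false =>
        rw [if_neg (by simp)]
        have hklt : k < mu + lam := by
          rcases Nat.lt_or_ge k (mu + lam) with hlt | hge
          · exact hlt
          · exfalso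
            have hkeq : k = mu + lam := by omega
            have hmem : PySem.Set.contains visited (pvX l pos k) = true :=
              (hvis _).mpr ⟨mu, by have := h.1; omega, by rw [hkeq, h.2.1]⟩
            rw [hmem] at hv
            cases hv
        have egd : (PySem.Dict.mk l).getD (pvX l pos k) 0 = pvX l pos (k + 1) := by
          rw [pvGetD_eq_pvG l _ hc, ← pvX_succ]
        rw [egd]
        have hvis' : ∀ y, PySem.Set.contains (PySem.Set.add visited (pvX l pos k)) y = true ↔
            ∃ j, j < k + 1 ∧ pvX l pos j = y := by
          intro y
          rw [PySem.Set.contains_iff, PySem.Set.mem_add]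
          constructor
          · rintro (hy | rfl)
            · obtain ⟨j, hj, hje⟩ := (hvis y).mp ((PySem.Set.contains_iff _ _).mpr hy)
              exact ⟨j, by omega, hje⟩
            · exact ⟨k, by omega, rfl⟩
          · rintro ⟨j, hj, hje⟩
            rcases Nat.lt_or_ge j k with hjk | hjk
            · exact Or.inl ((PySem.Set.contains_iff _ _).mp ((hvis y).mpr ⟨j, hjk, hje⟩))
            · have : j = k := by omega
              subst this
              exact Or.inr hje.symm
        have hkeys' : ∀ j, j < k + 1 → (PySem.Dict.mk l).contains (pvX l pos j) = true := by
          intro j hj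
          rcases Nat.lt_or_ge j k with hjk | hjk
          · exact hkeys j hjk
          · have : j = k := by omega
            subst this
            exact hc
        exact ih (k + 1) (PySem.Set.add visited (pvX l pos k)) hvis' (by omega) hkeys' (by omega)


-- ===== VERDICT (by name: the statement is the Claim_ definition above) =====
theorem get_final_position_spec : Claim_equal_get_final_position := by
  classical
  intro pos l _dom
  unfold Spec_get_final_position
  obtain ⟨mu, lam, h⟩ := pvRho_exists l pos
  have hml := pvMuLam_le l pos mu lam h
  have hlam := h.1
  have hA : get_final_position pos l = pvX l pos mu := by
    have hempty : ∀ y : Int, PySem.Set.contains PySem.Set.empty y = true ↔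
        ∃ j, j < 0 ∧ pvX l pos j = y := by
      intro y
      constructor
      · intro hy; exfalso; simp [PySem.Set.contains, PySem.Set.empty] at hy
      · rintro ⟨j, hj, -⟩; omega
    exact pvGoA_eq l pos mu lam h (l.length + 1) 0 PySem.Set.empty hempty (by omega)
      (by intro j hj; omega) (by omega)
  have hpi0 : 1 ≤ lam * (mu / lam + 1) ∧
      pvX l pos (lam * (mu / lam + 1)) = pvX l pos (2 * (lam * (mu / lam + 1))) := by
    have hge : mu ≤ lam * (mu / lam + 1) := by
      have h1 : lam * (mu / lam) + mu % lam = mu := Nat.div_add_mod mu lam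
      have hm2 : mu % lam < lam := Nat.mod_lt mu (by omega)
      have h5 : lam * (mu / lam + 1) = lam * (mu / lam) + lam := by ring
      omega
    constructor
    · have hpos : 0 < lam * (mu / lam + 1) := Nat.mul_pos (by omega) (Nat.succ_pos (mu / lam))
      omega
    · have h2 : 2 * (lam * (mu / lam + 1)) =
          lam * (mu / lam + 1) + (mu / lam + 1) * lam := by ring
      rw [h2]
      exact (pvX_period_mul l pos mu lam h (lam * (mu / lam + 1)) (mu / lam + 1) hge).symm
  have hex : ∃ j, 1 ≤ j ∧ pvX l pos j = pvX l pos (2 * j) := ⟨_, hpi0⟩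
  have hspec := Nat.find_spec hex
  have hfind_le : Nat.find hex ≤ lam * (mu / lam + 1) := Nat.find_min' hex hpi0
  have hi0le : lam * (mu / lam + 1) ≤ mu + lam := by
    have h3 := Nat.div_mul_le_self mu lam
    have h4 : lam * (mu / lam) = mu / lam * lam := Nat.mul_comm _ _
    have h5 : lam * (mu / lam + 1) = lam * (mu / lam) + lam := by ring
    omega
  have hB := pvPhase1_eq l pos mu lam (Nat.find hex) h hspec.2
    (by omega) (l.length + 1) 0 (by omega) (by omega)
    (by intro t ht; omega)
  rw [hA]
  unfold get_final_position_alt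
  exact hB.symm
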